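-- pv_equiv track=rewrite | github.com/Sagar5885/HackerRankPython | HackerRank/WarmUp/GCD&LCM.py | lcmsol
-- ===== SOURCE A (Python) =====
-- def lcmsol(a, b):
--     if(a>b):
--         num = a
--         den = b
--     else:
--         num = b
--         den = a
--     rem = num%den
--
--     while(rem!=0):
--         num = den
--         den = rem
--         rem = num%den
--
--     gcd = den
--     lcm = int(int(a * b) / int(gcd))
--
--     return lcm
-- ===== SOURCE B (Python) =====
-- def _stein(x, y):
--     if x == 0:
--         return y
--     if y == 0:
--         return x
--     k = 0
--     while (x | y) & 1 == 0:
--         x >>= 1; y >>= 1; k += 1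
--     while x & 1 == 0:
--         x >>= 1
--     while y:
--         while y & 1 == 0:
--             y >>= 1
--         if x > y:
--             x, y = y, x
--         y -= x
--     return x << k
--
-- def lcmsol(a, b):
--     x, y = abs(a), abs(b)
--     g = _stein(x, y)
--     return int(x * y / g)
-- ===== Notes on version B (the rewrite author's own statement) =====
-- stated objective: alternative
-- what changed: A's ordering block plus mod-based Euclidean while-loop is replaced by a binary (Stein) gcd on the absolute values, and the lcm is computed from the absolute values, so the result is the conventional nonnegative lcm; the float-based expression int(x*y/g) is kept so truncation behaviour matches for large products.
-- intended difference: When a and b are both negative, A returns a negative lcm (its loop's gcd inherits the sign of min(a,b) from Python's %), while B returns the conventional nonnegative lcm (e.g. A(-4,-6) = -12, B(-4,-6) = 12), which is what math.lcm returns and what a maintainer would intend. — e.g. on lcmsol(-4, -6): A returns -12, B returns 12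
-- crash fix: When min(a,b) == 0 but a and b are not both zero, A raises ZeroDivisionError (den = 0 in num%den) while B returns 0, the lcm. — e.g. on lcmsol(0, 5): A raises ZeroDivisionError, B returns 0
import Mathlib
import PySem

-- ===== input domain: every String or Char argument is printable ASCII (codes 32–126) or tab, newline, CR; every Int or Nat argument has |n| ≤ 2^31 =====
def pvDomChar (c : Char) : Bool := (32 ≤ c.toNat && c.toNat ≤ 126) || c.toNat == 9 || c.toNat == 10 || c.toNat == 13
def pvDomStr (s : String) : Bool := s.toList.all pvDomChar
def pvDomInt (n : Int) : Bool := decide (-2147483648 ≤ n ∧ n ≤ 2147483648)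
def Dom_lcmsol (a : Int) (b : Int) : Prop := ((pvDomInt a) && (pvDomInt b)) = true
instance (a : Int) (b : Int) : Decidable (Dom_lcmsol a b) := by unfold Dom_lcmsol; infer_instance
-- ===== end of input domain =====

-- B computes the gcd of the absolute values with a binary (Stein) gcd and the lcm from the
-- absolute values (so it is the conventional nonnegative lcm); objective: alternative algorithm.

-- Python's `%` keeps the divisor's sign and shrinks in magnitude: termination of A's loop.
theorem pvMod_natAbs_lt (x y : Int) (hy : y ≠ 0) :
    (PySem.Int.mod x y).natAbs < y.natAbs := by
  rcases lt_or_gt_of_ne hy with h | h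
  · have := PySem.Int.mod_neg_bounds x h
    omega
  · have h1 := PySem.Int.mod_nonneg x h
    have h2 := PySem.Int.mod_lt x h
    omega

-- Hand-written port of Python's  int(n / d)  on ints: IEEE-754 binary64 true division
-- (round-to-nearest, ties-to-even), then truncation toward zero.  Exact whenever d ≠ 0 and the
-- correctly rounded quotient is a finite normal double (always the case on Dom with d ≠ 0).
def pyIntTrueDivTrunc (n d : Int) : Int :=
  if n = 0 then 0 else
  let N := n.natAbs
  let D := d.natAbs
  let cand : Int := (Nat.log2 N : Int) - (Nat.log2 D : Int)
  -- E = floor(log2 (N/D))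
  let E : Int := if D * 2 ^ cand.toNat ≤ N * 2 ^ (-cand).toNat then cand else cand - 1
  -- 53-bit mantissa m = round_half_even(N * 2^(52-E) / D)
  let sh : Int := 52 - E
  let numer := N * 2 ^ sh.toNat
  let denom := D * 2 ^ (-sh).toNat
  let q := numer / denom
  let r := numer % denom
  let m := if 2 * r < denom then q else if denom < 2 * r then q + 1
           else if q % 2 = 0 then q else q + 1
  -- the double's value is m * 2^(E-52); truncate it toward zero
  let exp : Int := E - 52
  let val : Nat := if 0 ≤ exp then m * 2 ^ exp.toNat else m / 2 ^ (-exp).toNat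
  if (decide (n < 0)) != (decide (d < 0)) then -(val : Int) else (val : Int)

-- ===== PORT A =====
-- the while-loop: state (num, den, rem); returns the final den
def lcmsolLoop (num den rem : Int) : Int :=
  if h : rem ≠ 0 then lcmsolLoop den rem (PySem.Int.mod den rem) else den
termination_by rem.natAbs
decreasing_by exact pvMod_natAbs_lt den rem h

def lcmsol (a : Int) (b : Int) : Int :=
  let num := if a > b then a else b
  let den := if a > b then b else a
  let rem := PySem.Int.mod num den
  let gcd := lcmsolLoop num den rem
  pyIntTrueDivTrunc (a * b) gcd

-- ===== PORT B =====
-- `while (x | y) & 1 == 0: x >>= 1; y >>= 1; k += 1`  (the 0 < x conjunct only makes the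
-- recursion total; _stein reaches this loop only with 0 < x, which halving an even x preserves)
def steinStripCommon (x y k : Nat) : Nat × Nat × Nat :=
  if h : (x ||| y) &&& 1 = 0 ∧ 0 < x then steinStripCommon (x >>> 1) (y >>> 1) (k + 1)
  else (x, y, k)
termination_by x
decreasing_by rw [Nat.shiftRight_one]; omega

-- `while x & 1 == 0: x >>= 1`  (same totality guard)
def steinStripOdd (x : Nat) : Nat :=
  if h : x &&& 1 = 0 ∧ 0 < x then steinStripOdd (x >>> 1) else x
termination_by x
decreasing_by rw [Nat.shiftRight_one]; omega

-- (termination measure of the subtract-and-strip loop below, cited by its decreasing_by)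
theorem steinStripOdd_le (x : Nat) : steinStripOdd x ≤ x := by
  induction x using steinStripOdd.induct with
  | case1 w hw ih =>
    rw [steinStripOdd, dif_pos hw]
    rw [Nat.shiftRight_one] at ih ⊢
    omega
  | case2 w hw => rw [steinStripOdd, dif_neg hw]

-- `while y: while y & 1 == 0: y >>= 1; if x > y: x, y = y, x; y -= x`  (same totality guard)
def steinLoop (x y : Nat) : Nat :=
  if h : y ≠ 0 ∧ 0 < x then
    let y1 := steinStripOdd y
    if x > y1 then steinLoop y1 (x - y1) else steinLoop x (y1 - x)
  else x
termination_by x + y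
decreasing_by
  · omega
  · have := steinStripOdd_le y
    omega

def stein (x y : Nat) : Nat :=
  if x = 0 then y
  else if y = 0 then x
  else
    let s := steinStripCommon x y 0
    let x2 := steinStripOdd s.1
    (steinLoop x2 s.2.1) <<< s.2.2

def lcmsol_alt (a : Int) (b : Int) : Int :=
  let x := |a|
  let y := |b|
  let g := stein x.natAbs y.natAbs
  pyIntTrueDivTrunc (x * y) (g : Int)

-- ===== PRECONDITION & SPEC =====
-- A raises ZeroDivisionError exactly when the smaller argument is 0 (den = 0); those inputs are excluded.
def Pre_lcmsol (a : Int) (b : Int) : Prop := min a b ≠ 0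
instance (a : Int) (b : Int) : Decidable (Pre_lcmsol a b) := by unfold Pre_lcmsol; infer_instance
def pvWitness_lcmsol : Int × Int := (4, 6)

-- On (a,b) with min(a,b) = 0 but not both zero, A raises ZeroDivisionError while B returns 0 (= lcm).
def Raises_lcmsol (a : Int) (b : Int) : Prop := min a b = 0 ∧ ¬(a = 0 ∧ b = 0)
instance (a : Int) (b : Int) : Decidable (Raises_lcmsol a b) := by unfold Raises_lcmsol; infer_instance
def pvRaiseWitness_lcmsol : Int × Int := (0, 5)
def pvRaiseWitnessOut_lcmsol : Int := 0

-- When a and b are both negative, A returns a negative lcm (its loop's gcd inherits the sign of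
-- min(a,b) from Python's %), while B returns the conventional nonnegative lcm, the intended value.
def D_lcmsol (a : Int) (b : Int) : Prop := a < 0 ∧ b < 0
instance (a : Int) (b : Int) : Decidable (D_lcmsol a b) := by unfold D_lcmsol; infer_instance

def Spec_lcmsol (a : Int) (b : Int) (out : Int) : Prop := ¬ D_lcmsol a b → out = lcmsol_alt a b
instance (a : Int) (b : Int) (out : Int) : Decidable (Spec_lcmsol a b out) := by unfold Spec_lcmsol; infer_instance

def pvDiffWitness_lcmsol : Int × Int := (-4, -6)
def pvDiffWitnessOut_lcmsol : Int × Int := (-12, 12)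

-- ===== CLAIM (what is proved, stated in full; the proofs are below) =====
def Claim_unchanged_lcmsol : Prop := ∀ (a : Int) (b : Int), Dom_lcmsol a b → Pre_lcmsol a b → Spec_lcmsol a b (lcmsol a b)
def Claim_changed_lcmsol : Prop := Dom_lcmsol (pvDiffWitness_lcmsol.1) (pvDiffWitness_lcmsol.2) ∧ Pre_lcmsol (pvDiffWitness_lcmsol.1) (pvDiffWitness_lcmsol.2) ∧ D_lcmsol (pvDiffWitness_lcmsol.1) (pvDiffWitness_lcmsol.2) ∧ lcmsol (pvDiffWitness_lcmsol.1) (pvDiffWitness_lcmsol.2) = pvDiffWitnessOut_lcmsol.1 ∧ lcmsol_alt (pvDiffWitness_lcmsol.1) (pvDiffWitness_lcmsol.2) = pvDiffWitnessOut_lcmsol.2 ∧ pvDiffWitnessOut_lcmsol.1 ≠ pvDiffWitnessOut_lcmsol.2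
def Claim_raises_lcmsol : Prop := (∀ (a : Int) (b : Int), Dom_lcmsol a b → Raises_lcmsol a b → ¬ Pre_lcmsol a b) ∧ (Dom_lcmsol (pvRaiseWitness_lcmsol.1) (pvRaiseWitness_lcmsol.2) ∧ Raises_lcmsol (pvRaiseWitness_lcmsol.1) (pvRaiseWitness_lcmsol.2) ∧ lcmsol_alt (pvRaiseWitness_lcmsol.1) (pvRaiseWitness_lcmsol.2) = pvRaiseWitnessOut_lcmsol)

-- ===== LEMMAS AND PROOFS =====

-- Python's % is preserved by gcd: gcd(y, x % y) = gcd(x, y).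
theorem pvGcd_mod (x y : Int) : Int.gcd y (PySem.Int.mod x y) = Int.gcd x y := by
  have h : PySem.Int.mod x y = x + y * (-(x.fdiv y)) := by
    show Int.fmod x y = _
    rw [Int.fmod_def]; ring
  rw [h, Int.gcd_comm]
  exact Int.gcd_add_mul_left_left y x _

theorem pvGcd_of_dvd (x y : Int) (h : y ∣ x) : Int.gcd x y = y.natAbs :=
  Nat.dvd_antisymm (Nat.gcd_dvd_right _ _) (Nat.dvd_gcd (Int.natAbs_dvd_natAbs.mpr h) dvd_rfl)

-- A's loop computes gcd(num, den) carrying the sign of den (Python's % keeps the divisor's sign).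
theorem lcmsolLoop_eq (n : Nat) : ∀ (y x : Int), y.natAbs < n → y ≠ 0 →
    lcmsolLoop x y (PySem.Int.mod x y) =
      (if y < 0 then -(Int.gcd x y : Int) else (Int.gcd x y : Int)) := by
  induction n with
  | zero => intro y x h; omega
  | succ n ih =>
    intro y x hlt hy
    rw [lcmsolLoop]
    by_cases hr : PySem.Int.mod x y = 0
    · have hdvd : y ∣ x := (PySem.Int.mod_eq_zero_iff_dvd x y).mp hr
      rw [pvGcd_of_dvd x y hdvd, dif_neg (by simp [hr])]
      split_ifs <;> omega
    · simp only [hr, ne_eq, not_false_eq_true, dite_true]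
      rw [ih (PySem.Int.mod x y) y (by have := pvMod_natAbs_lt x y hy; omega) hr]
      rw [pvGcd_mod]
      have hsign : PySem.Int.mod x y < 0 ↔ y < 0 := by
        rcases lt_or_gt_of_ne hy with h | h
        · have := PySem.Int.mod_neg_bounds x h; constructor <;> intro <;> omega
        · have h1 := PySem.Int.mod_nonneg x h
          constructor <;> intro <;> omega
      simp only [hsign]

-- parity reading of the bit tests in B
theorem pvAndOne_zero (x : Nat) : x &&& 1 = 0 ↔ x % 2 = 0 := by
  rw [Nat.and_one_is_mod]

theorem pvOrAndOne_zero (x y : Nat) : (x ||| y) &&& 1 = 0 ↔ x % 2 = 0 ∧ y % 2 = 0 := by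
  rw [Nat.and_one_is_mod, Nat.mod_two_eq_zero_iff_testBit_zero, Nat.testBit_or,
      Nat.mod_two_eq_zero_iff_testBit_zero, Nat.mod_two_eq_zero_iff_testBit_zero]
  simp

-- steinStripOdd: keeps positivity, ends odd, and preserves gcd against an odd partner
theorem steinStripOdd_odd (x : Nat) (hx : 0 < x) : steinStripOdd x % 2 = 1 := by
  induction x using steinStripOdd.induct with
  | case1 w hw ih =>
    rw [steinStripOdd, dif_pos hw]
    rw [Nat.shiftRight_one] at ih ⊢
    have := (pvAndOne_zero w).mp hw.1
    exact ih (by omega)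
  | case2 w hw =>
    rw [steinStripOdd, dif_neg hw]
    rcases Nat.mod_two_eq_zero_or_one w with h | h
    · exact absurd ⟨(pvAndOne_zero w).mpr h, hx⟩ hw
    · exact h

theorem steinStripOdd_gcd (n : Nat) (hn : n % 2 = 1) (x : Nat) :
    Nat.gcd n (steinStripOdd x) = Nat.gcd n x := by
  induction x using steinStripOdd.induct with
  | case1 w hw ih =>
    rw [steinStripOdd, dif_pos hw, ih]
    have hw2 := (pvAndOne_zero w).mp hw.1
    have h2 : w = 2 * (w >>> 1) := by rw [Nat.shiftRight_one]; omega
    calc Nat.gcd n (w >>> 1) = Nat.gcd n (2 * (w >>> 1)) :=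
          (Nat.Coprime.gcd_mul_left_cancel_right _
            ((Nat.coprime_two_left).mpr (Nat.odd_iff.mpr hn))).symm
      _ = Nat.gcd n w := by rw [← h2]
  | case2 w hw => rw [steinStripOdd, dif_neg hw]

theorem steinStripOdd_gcd' (n : Nat) (hn : n % 2 = 1) (x : Nat) :
    Nat.gcd (steinStripOdd x) n = Nat.gcd x n := by
  rw [Nat.gcd_comm, steinStripOdd_gcd n hn x, Nat.gcd_comm]

-- the subtract-and-strip loop computes the gcd once x is odd
theorem steinLoop_gcd (x y : Nat) (hx : x % 2 = 1) : steinLoop x y = Nat.gcd x y := by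
  induction x, y using steinLoop.induct with
  | case1 x y h y1 hgt ih =>
    rw [steinLoop, dif_pos h, if_pos hgt]
    have hy1odd : steinStripOdd y % 2 = 1 := steinStripOdd_odd y (by omega)
    rw [ih hy1odd]
    have h1 : Nat.gcd (steinStripOdd y) (x - steinStripOdd y) =
        Nat.gcd (steinStripOdd y) x := Nat.gcd_sub_self_right (by omega)
    rw [h1, Nat.gcd_comm, steinStripOdd_gcd x hx y]
  | case2 x y h y1 hgt ih =>
    rw [steinLoop, dif_pos h, if_neg hgt]
    rw [ih hx]
    have h1 : Nat.gcd x (steinStripOdd y - x) = Nat.gcd x (steinStripOdd y) :=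
      Nat.gcd_sub_self_right (by omega)
    rw [h1, steinStripOdd_gcd x hx y]
  | case3 x y h =>
    rw [steinLoop, dif_neg h]
    have : y = 0 := by
      by_contra hy
      exact h ⟨hy, by omega⟩
    rw [this, Nat.gcd_zero_right]

-- steinStripCommon: keeps positivity, its counter only grows, it stops with an odd member,
-- and it divides out exactly 2^(k'-k) from the gcd
theorem steinStripCommon_pos (x y k : Nat) (hx : 0 < x) : 0 < (steinStripCommon x y k).1 := by
  induction x, y, k using steinStripCommon.induct with
  | case1 x y k h ih =>
    rw [steinStripCommon, dif_pos h]
    have hx2 := ((pvOrAndOne_zero x y).mp h.1).1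
    rw [Nat.shiftRight_one] at ih ⊢
    exact ih (by omega)
  | case2 x y k h => rw [steinStripCommon, dif_neg h]; exact hx

theorem steinStripCommon_k_le (x y k : Nat) : k ≤ (steinStripCommon x y k).2.2 := by
  induction x, y, k using steinStripCommon.induct with
  | case1 x y k h ih => rw [steinStripCommon, dif_pos h]; omega
  | case2 x y k h => rw [steinStripCommon, dif_neg h]

theorem steinStripCommon_stop (x y k : Nat) (hx : 0 < x) :
    ¬(((steinStripCommon x y k).1 ||| (steinStripCommon x y k).2.1) &&& 1 = 0 ∧
      0 < (steinStripCommon x y k).1) := by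
  induction x, y, k using steinStripCommon.induct with
  | case1 x y k h ih =>
    rw [steinStripCommon, dif_pos h]
    have hx2 := ((pvOrAndOne_zero x y).mp h.1).1
    rw [Nat.shiftRight_one] at ih ⊢
    exact ih (by omega)
  | case2 x y k h => rw [steinStripCommon, dif_neg h]; exact h

theorem steinStripCommon_gcd (x y k : Nat) (hx : 0 < x) :
    Nat.gcd (steinStripCommon x y k).1 (steinStripCommon x y k).2.1 *
      2 ^ ((steinStripCommon x y k).2.2 - k) = Nat.gcd x y := by
  induction x, y, k using steinStripCommon.induct with
  | case1 x y k h ih =>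
    rw [steinStripCommon, dif_pos h]
    have hpar := (pvOrAndOne_zero x y).mp h.1
    have hx2 : x = 2 * (x >>> 1) := by rw [Nat.shiftRight_one]; omega
    have hy2 : y = 2 * (y >>> 1) := by rw [Nat.shiftRight_one]; omega
    have hxp : 0 < x >>> 1 := by rw [Nat.shiftRight_one]; omega
    have hk := steinStripCommon_k_le (x >>> 1) (y >>> 1) (k + 1)
    have ihx := ih hxp
    have hgcd2 : Nat.gcd x y = 2 * Nat.gcd (x >>> 1) (y >>> 1) := by
      conv_lhs => rw [hx2, hy2]
      exact Nat.gcd_mul_left 2 _ _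
    rw [hgcd2, ← ihx]
    have hpow : 2 ^ ((steinStripCommon (x >>> 1) (y >>> 1) (k + 1)).2.2 - k) =
        2 * 2 ^ ((steinStripCommon (x >>> 1) (y >>> 1) (k + 1)).2.2 - (k + 1)) := by
      rw [← pow_succ']
      congr 1
      omega
    rw [hpow]; ring
  | case2 x y k h =>
    rw [steinStripCommon, dif_neg h]
    simp

-- B's gcd is the gcd
theorem stein_gcd (x y : Nat) : stein x y = Nat.gcd x y := by
  rw [stein]
  by_cases hx : x = 0
  · rw [if_pos hx, hx, Nat.gcd_zero_left]
  rw [if_neg hx]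
  by_cases hy : y = 0
  · rw [if_pos hy, hy, Nat.gcd_zero_right]
  rw [if_neg hy]
  show steinLoop (steinStripOdd (steinStripCommon x y 0).1) (steinStripCommon x y 0).2.1 <<<
      (steinStripCommon x y 0).2.2 = Nat.gcd x y
  have hxp : 0 < x := by omega
  have hp := steinStripCommon_pos x y 0 hxp
  have hstop := steinStripCommon_stop x y 0 hxp
  have hgcd := steinStripCommon_gcd x y 0 hxp
  set s := steinStripCommon x y 0 with hs
  have hodd : steinStripOdd s.1 % 2 = 1 := steinStripOdd_odd s.1 hp
  rw [steinLoop_gcd _ _ hodd, Nat.shiftLeft_eq]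
  have hgcd1 : Nat.gcd (steinStripOdd s.1) s.2.1 = Nat.gcd s.1 s.2.1 := by
    by_cases h1 : s.1 % 2 = 1
    · -- s.1 already odd: the strip is a no-op
      rw [steinStripOdd, dif_neg (by rw [pvAndOne_zero]; omega)]
    · -- then s.2.1 is odd (the common loop stopped)
      have h2 : s.2.1 % 2 = 1 := by
        rcases Nat.mod_two_eq_zero_or_one s.2.1 with h' | h'
        · exact absurd ⟨(pvOrAndOne_zero s.1 s.2.1).mpr ⟨by omega, h'⟩, hp⟩ hstop
        · exact h'
      exact steinStripOdd_gcd' s.2.1 h2 s.1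
  rw [hgcd1, ← hgcd]
  simp

-- flipping both signs of a division with negative operands does not change int(n/d)
theorem pyIntTrueDivTrunc_neg_neg (n d : Int) (hn : n < 0) (hd : d < 0) :
    pyIntTrueDivTrunc n d = pyIntTrueDivTrunc (-n) (-d) := by
  have h1 : ¬ n = 0 := by omega
  have h2 : ¬ (-n) = 0 := by omega
  have h3 : decide (n < 0) = true := by simp [hn]
  have h4 : decide (d < 0) = true := by simp [hd]
  have h5 : decide (-n < 0) = false := by simp; omega
  have h6 : decide (-d < 0) = false := by simp; omega
  simp only [pyIntTrueDivTrunc, Int.natAbs_neg, if_neg h1, if_neg h2, h3, h4, h5, h6]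
  simp

-- A as a closed form: int(a*b / (sign(min a b) * gcd a b))
theorem lcmsol_closed (a b : Int) (hmin : min a b ≠ 0) :
    lcmsol a b = pyIntTrueDivTrunc (a * b)
      (if min a b < 0 then -(Int.gcd a b : Int) else (Int.gcd a b : Int)) := by
  simp only [lcmsol]
  by_cases hab : a > b
  · simp only [if_pos hab]
    have hb : b ≠ 0 := by omega
    rw [lcmsolLoop_eq (b.natAbs + 1) b a (by omega) hb]
    have hm : min a b = b := by omega
    rw [hm]
  · simp only [if_neg hab]
    have ha : a ≠ 0 := by omega
    rw [lcmsolLoop_eq (a.natAbs + 1) a b (by omega) ha]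
    have hm : min a b = a := by omega
    rw [hm, Int.gcd_comm]

-- B as a closed form: int(|a|*|b| / gcd a b)
theorem lcmsol_alt_closed (a b : Int) :
    lcmsol_alt a b = pyIntTrueDivTrunc (|a| * |b|) (Int.gcd a b : Int) := by
  simp only [lcmsol_alt]
  rw [stein_gcd]
  have h : Nat.gcd (|a|).natAbs (|b|).natAbs = Int.gcd a b := by
    rw [Int.natAbs_abs, Int.natAbs_abs]; rfl
  rw [h]

-- the two evaluations at the difference witness (-4, -6)
theorem lcmsol_at_witness : lcmsol (-4) (-6) = -12 := by
  have h1 : PySem.Int.mod (-4) (-6) = -4 := by decide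
  have h2 : PySem.Int.mod (-6) (-4) = -2 := by decide
  have h3 : PySem.Int.mod (-4) (-2) = 0 := by decide
  have hloop : lcmsolLoop (-4) (-6) (-4) = -2 := by
    rw [lcmsolLoop, dif_pos (by norm_num), h2, lcmsolLoop, dif_pos (by norm_num), h3,
        lcmsolLoop, dif_neg (by norm_num)]
  show pyIntTrueDivTrunc ((-4) * (-6))
      (lcmsolLoop (if (-4:Int) > (-6:Int) then (-4:Int) else (-6:Int))
        (if (-4:Int) > (-6:Int) then (-6:Int) else (-4:Int))
        (PySem.Int.mod (if (-4:Int) > (-6:Int) then (-4:Int) else (-6:Int))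
          (if (-4:Int) > (-6:Int) then (-6:Int) else (-4:Int)))) = -12
  norm_num
  rw [hloop]
  decide

theorem lcmsol_alt_at_witness : lcmsol_alt (-4) (-6) = 12 := by
  have hstein : stein 4 6 = 2 := by
    rw [stein_gcd]
    decide
  show pyIntTrueDivTrunc (|(-4:Int)| * |(-6:Int)|) ((stein (|(-4:Int)|).natAbs (|(-6:Int)|).natAbs : Nat) : Int) = 12
  norm_num
  rw [hstein]
  decide

-- ===== VERDICT (by name: the statements are the Claim_ definitions above) =====
theorem lcmsol_spec : Claim_unchanged_lcmsol := by
  intro a b _ hpre hnd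
  have hmin : min a b ≠ 0 := hpre
  have hd : ¬(a < 0 ∧ b < 0) := hnd
  unfold Spec_lcmsol at *
  rw [lcmsol_closed a b hmin, lcmsol_alt_closed a b]
  by_cases hneg : min a b < 0
  · -- exactly one of a, b is negative; the other is ≥ 0
    rw [if_pos hneg]
    by_cases h0 : a * b = 0
    · -- one factor is 0: both sides are int(0/…) = 0
      rw [← abs_mul, h0, abs_zero]
      simp [pyIntTrueDivTrunc]
    · have hprod : a * b < 0 := by
        rcases lt_trichotomy a 0 with ha | ha | ha
        · have hb : 0 < b := by
            rcases lt_trichotomy b 0 with hb | hb | hb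
            · exact absurd ⟨ha, hb⟩ hd
            · exact absurd (by rw [hb, mul_zero]) h0
            · exact hb
          exact mul_neg_of_neg_of_pos ha hb
        · exact absurd (by rw [ha, zero_mul]) h0
        · have hb : b < 0 := by omega
          exact mul_neg_of_pos_of_neg ha hb
      have ha0 : a ≠ 0 := left_ne_zero_of_mul h0
      have hgn : Int.gcd a b ≠ 0 := by
        simp [Int.gcd_eq_zero_iff, ha0]
      have hgpos : (0 : Int) < (Int.gcd a b : Int) := by
        exact_mod_cast Nat.pos_of_ne_zero hgn
      rw [pyIntTrueDivTrunc_neg_neg (a * b) (-(Int.gcd a b : Int)) hprod (by omega)]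
      rw [neg_neg, ← abs_mul, abs_of_neg hprod]
  · -- both positive
    rw [if_neg hneg]
    have ha : 0 < a := by omega
    have hb : 0 < b := by omega
    rw [abs_of_pos ha, abs_of_pos hb]

theorem lcmsol_changed : Claim_changed_lcmsol := by
  unfold Claim_changed_lcmsol
  exact ⟨by decide, by decide, by decide, lcmsol_at_witness, lcmsol_alt_at_witness, by decide⟩

theorem lcmsol_raises : Claim_raises_lcmsol := by
  unfold Claim_raises_lcmsol
  refine ⟨?_, by decide, by decide, ?_⟩
  · intro a b _ hr hp
    exact hp hr.1
  · show pyIntTrueDivTrunc (|(0:Int)| * |(5:Int)|) ((stein (|(0:Int)|).natAbs (|(5:Int)|).natAbs : Nat) : Int) = 0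
    norm_num
    decide

-- self-check: B's port really returns the stated value at the raise witness (reads lcmsol_raises)
theorem pvRaiseWitnessOut_lcmsol_ok :
    lcmsol_alt pvRaiseWitness_lcmsol.1 pvRaiseWitness_lcmsol.2 = pvRaiseWitnessOut_lcmsol :=
  lcmsol_raises.2.2.2
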